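-- pv_equiv track=rewrite | github.com/JakubKazimierski/PythonPortfolio | Easy/SumMultiplier/SumMultiplier.py | SumMultiplier
-- ===== SOURCE A (Python) =====
-- from itertools import combinations
-- import operator
--
-- def SumMultiplier(arr):
--     '''
--     Have the function SumMultiplier(arr)
--     take the array of numbers stored in arr
--     and return the string true if any two
--     numbers can be multiplied so that the
--     answer is greater than double the sum of
--     all the elements in the array. If not,
--     return the string false.
--
--     For example: if arr is
--     [2, 5, 6, -6, 16, 2, 3, 6, 5, 3]
--     then the sum of all these elements is 42
--     and doubling it is 84.
--     There are two elements in the array,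
--     16 * 6 = 96 and 96 is greater than 84,
--     so your program should return the string true.
--     '''
--     try:
--         double_sum_arr = sum(arr)*2
--
--         pair_combinations = list(combinations(arr, 2))
--
--         for pair in pair_combinations:
--             if operator.mul(pair[0], pair[1]) > double_sum_arr:
--                 return "true"
--
--         return "false"
--
--     except(TypeError):
--         return -1
-- ===== SOURCE B (Python) =====
-- def SumMultiplier(arr):
--     if len(arr) < 2:
--         return "false"
--     s = sorted(arr)
--     best = max(s[-1] * s[-2], s[0] * s[1])
--     return "true" if best > 2 * sum(arr) else "false"
-- ===== Notes on version B (the rewrite author's own statement) =====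
-- stated objective: faster
-- what changed: Replaced the O(n^2) scan over all pair combinations by sorting once and checking only the maximum candidate pair product, max(product of the two largest, product of the two smallest).
import Mathlib
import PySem

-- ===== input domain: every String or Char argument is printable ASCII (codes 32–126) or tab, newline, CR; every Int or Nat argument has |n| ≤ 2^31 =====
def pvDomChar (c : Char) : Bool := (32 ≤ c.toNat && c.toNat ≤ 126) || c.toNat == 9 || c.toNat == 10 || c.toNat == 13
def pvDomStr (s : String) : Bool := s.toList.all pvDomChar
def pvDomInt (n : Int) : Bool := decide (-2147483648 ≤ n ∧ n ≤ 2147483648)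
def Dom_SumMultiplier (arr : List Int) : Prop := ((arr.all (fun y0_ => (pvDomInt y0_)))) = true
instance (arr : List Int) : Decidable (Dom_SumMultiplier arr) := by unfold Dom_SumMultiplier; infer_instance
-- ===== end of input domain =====

-- B sorts once and checks only the maximum candidate pair product instead of scanning all pairs (objective: faster, O(n log n) vs O(n^2)).

-- ===== PORT A =====
-- list(combinations(arr, 2)) in order
def pvCombos : List Int → List (Int × Int)
  | [] => []
  | x :: xs => (xs.map fun y => (x, y)) ++ pvCombos xs

-- the 'for pair in pair_combinations' loop with its early return
def pvLoopA (t : Int) : List (Int × Int) → String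
  | [] => "false"
  | p :: ps => if p.1 * p.2 > t then "true" else pvLoopA t ps

def SumMultiplier (arr : List Int) : String :=
  pvLoopA (arr.sum * 2) (pvCombos arr)

-- ===== PORT B =====
def SumMultiplier_alt (arr : List Int) : String :=
  if arr.length < 2 then "false"
  else
    let s := PySem.List.sorted arr (fun x => x) false
    let best := max ((PySem.List.pyGet? s (-1)).getD 0 * (PySem.List.pyGet? s (-2)).getD 0)
                    ((PySem.List.pyGet? s 0).getD 0 * (PySem.List.pyGet? s 1).getD 0)
    if best > 2 * arr.sum then "true" else "false"

-- ===== PRECONDITION & SPEC =====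
def Spec_SumMultiplier (arr : List Int) (out : String) : Prop := out = SumMultiplier_alt arr
instance (arr : List Int) (out : String) : Decidable (Spec_SumMultiplier arr out) := by unfold Spec_SumMultiplier; infer_instance

-- ===== CLAIM (what is proved, stated in full; the proofs are below) =====
def Claim_equal_SumMultiplier : Prop := ∀ (arr : List Int), Dom_SumMultiplier arr → Spec_SumMultiplier arr (SumMultiplier arr)

-- ===== LEMMAS AND PROOFS =====

-- A's loop returns "true" iff some pair in the list has product above the threshold
theorem pvLoopA_eq (t : Int) (ps : List (Int × Int)) :
    pvLoopA t ps = if ∃ p ∈ ps, p.1 * p.2 > t then "true" else "false" := by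
  induction ps with
  | nil => simp [pvLoopA]
  | cons p ps ih =>
      by_cases h : p.1 * p.2 > t
      · simp [pvLoopA, h]
      · simp only [pvLoopA, if_neg h, ih]
        congr 1
        simp [h]

-- membership in combinations(l, 2) = being a 2-element sublist
theorem mem_pvCombos (u v : Int) (l : List Int) :
    (u, v) ∈ pvCombos l ↔ List.Sublist [u, v] l := by
  induction l with
  | nil => simp [pvCombos]
  | cons x xs ih =>
      simp only [pvCombos, List.mem_append, List.mem_map, ih]
      constructor
      · rintro (⟨y, hy, he⟩ | h)
        · obtain ⟨rfl, rfl⟩ : u = x ∧ v = y := by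
            exact ⟨(Prod.mk.injEq _ _ _ _ ▸ he).1.symm, (Prod.mk.injEq _ _ _ _ ▸ he).2.symm⟩
          exact List.Sublist.cons₂ _ (List.singleton_sublist.mpr hy)
        · exact List.Sublist.cons x h
      · intro h
        rcases List.sublist_cons_iff.mp h with h' | ⟨r, hr, hsub⟩
        · exact Or.inr h'
        · obtain ⟨rfl, rfl⟩ : u = x ∧ r = [v] := by
            cases hr; exact ⟨rfl, rfl⟩
          exact Or.inl ⟨v, List.singleton_sublist.mp hsub, rfl⟩

-- existence of a pair with big product is permutation-invariant
def PvPair (l : List Int) (u v : Int) : Prop :=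
  (u ≠ v ∧ u ∈ l ∧ v ∈ l) ∨ (u = v ∧ 2 ≤ l.count u)

theorem pvPair_of_sublist {l : List Int} {u v : Int} (h : List.Sublist [u, v] l) : PvPair l u v := by
  by_cases huv : u = v
  · subst huv
    refine Or.inr ⟨rfl, ?_⟩
    have : List.Sublist (List.replicate 2 u) l := by simpa [List.replicate] using h
    exact List.replicate_sublist_iff.mp this
  · exact Or.inl ⟨huv, h.subset (by simp), h.subset (by simp)⟩

theorem sublist_pair_of_mem {l : List Int} {u v : Int} (hu : u ∈ l) (hv : v ∈ l) (hne : u ≠ v) :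
    List.Sublist [u, v] l ∨ List.Sublist [v, u] l := by
  induction l with
  | nil => simp at hu
  | cons x xs ih =>
      by_cases hux : u = x
      · subst hux
        have hvx : v ∈ xs := by
          rcases List.mem_cons.mp hv with h | h
          · exact absurd h.symm hne
          · exact h
        exact Or.inl (List.Sublist.cons₂ _ (List.singleton_sublist.mpr hvx))
      · by_cases hvx : v = x
        · subst hvx
          have hux' : u ∈ xs := by
            rcases List.mem_cons.mp hu with h | h
            · exact absurd h hux
            · exact h
          exact Or.inr (List.Sublist.cons₂ _ (List.singleton_sublist.mpr hux'))
        · have hu' : u ∈ xs := (List.mem_cons.mp hu).resolve_left hux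
          have hv' : v ∈ xs := (List.mem_cons.mp hv).resolve_left hvx
          rcases ih hu' hv' with h | h
          · exact Or.inl (List.Sublist.cons x h)
          · exact Or.inr (List.Sublist.cons x h)

theorem sublist_of_pvPair {l : List Int} {u v : Int} (h : PvPair l u v) :
    List.Sublist [u, v] l ∨ List.Sublist [v, u] l := by
  rcases h with ⟨hne, hu, hv⟩ | ⟨rfl, hc⟩
  · exact sublist_pair_of_mem hu hv hne
  · left
    have : List.Sublist (List.replicate 2 u) l := List.replicate_sublist_iff.mpr hc
    simpa [List.replicate] using this

theorem pvPair_perm {l l' : List Int} {u v : Int} (hp : l.Perm l') (h : PvPair l u v) :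
    PvPair l' u v := by
  rcases h with ⟨hne, hu, hv⟩ | ⟨rfl, hc⟩
  · exact Or.inl ⟨hne, hp.mem_iff.mp hu, hp.mem_iff.mp hv⟩
  · exact Or.inr ⟨rfl, by rw [← hp.count_eq]; exact hc⟩

def PvEx (l : List Int) (t : Int) : Prop := ∃ u v, List.Sublist [u, v] l ∧ u * v > t

theorem pvEx_iff_pair (l : List Int) (t : Int) :
    PvEx l t ↔ ∃ u v, PvPair l u v ∧ u * v > t := by
  constructor
  · rintro ⟨u, v, hs, hgt⟩
    exact ⟨u, v, pvPair_of_sublist hs, hgt⟩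
  · rintro ⟨u, v, hp, hgt⟩
    rcases sublist_of_pvPair hp with h | h
    · exact ⟨u, v, h, hgt⟩
    · exact ⟨v, u, h, by linarith [mul_comm u v, hgt]⟩

theorem pvEx_perm {l l' : List Int} (hp : l.Perm l') (t : Int) : PvEx l t ↔ PvEx l' t := by
  rw [pvEx_iff_pair, pvEx_iff_pair]
  constructor
  · rintro ⟨u, v, h, hgt⟩; exact ⟨u, v, pvPair_perm hp h, hgt⟩
  · rintro ⟨u, v, h, hgt⟩; exact ⟨u, v, pvPair_perm hp.symm h, hgt⟩

-- in a 2-element sublist of x :: xs, the second element lies in xs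
theorem snd_mem_tail {u v x : Int} {xs : List Int} (h : List.Sublist [u, v] (x :: xs)) : v ∈ xs := by
  rcases List.sublist_cons_iff.mp h with h' | ⟨r, hr, hsub⟩
  · exact h'.subset (by simp)
  · cases hr
    exact List.singleton_sublist.mp hsub

-- the product of any 2-element sublist of a sorted list is at most
-- max (last * second-to-last) (first * second)
theorem pair_le_best {s : List Int} (hpw : s.Pairwise (· ≤ ·))
    {m1 m2 M1 M2 : Int} {rest rr : List Int}
    (h1 : s = m1 :: m2 :: rest) (h2 : s.reverse = M1 :: M2 :: rr)
    {u v : Int} (huv : List.Sublist [u, v] s) :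
    u * v ≤ max (M1 * M2) (m1 * m2) := by
  have hrevpw : s.reverse.Pairwise (fun a b => b ≤ a) := by
    rw [List.pairwise_reverse]; exact hpw
  have huv' : List.Sublist [v, u] s.reverse := by simpa using huv.reverse
  -- u ≤ v
  have huv_le : u ≤ v := by
    have := List.Pairwise.sublist huv hpw
    simpa using this
  -- m1 ≤ u, v ≤ M1
  have hm1 : ∀ x ∈ s, m1 ≤ x := by
    intro x hx
    rw [h1] at hx hpw
    rcases List.mem_cons.mp hx with h | h
    · omega
    · exact (List.pairwise_cons.mp hpw).1 x h
  have hM1 : ∀ x ∈ s, x ≤ M1 := by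
    intro x hx
    have hx' : x ∈ s.reverse := by simpa using hx
    rw [h2] at hx' hrevpw
    rcases List.mem_cons.mp hx' with h | h
    · omega
    · exact (List.pairwise_cons.mp hrevpw).1 x h
  have hm1u : m1 ≤ u := hm1 u (huv.subset (by simp))
  have hvM1 : v ≤ M1 := hM1 v (huv.subset (by simp))
  -- m2 ≤ v
  have hm2v : m2 ≤ v := by
    have hv2 : v ∈ m2 :: rest := snd_mem_tail (h1 ▸ huv)
    rw [h1] at hpw
    rcases List.mem_cons.mp hv2 with h | h
    · omega
    · exact ((List.pairwise_cons.mp hpw).2 |> List.pairwise_cons.mp).1 v h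
  -- u ≤ M2
  have huM2 : u ≤ M2 := by
    have hu2 : u ∈ M2 :: rr := snd_mem_tail (h2 ▸ huv')
    rw [h2] at hrevpw
    rcases List.mem_cons.mp hu2 with h | h
    · omega
    · exact ((List.pairwise_cons.mp hrevpw).2 |> List.pairwise_cons.mp).1 u h
  -- sign analysis
  rcases le_or_gt 0 u with hu0 | hu0
  · -- 0 ≤ u : u*v ≤ M2*v ≤ M2*M1
    have hv0 : 0 ≤ v := le_trans hu0 huv_le
    have hM20 : 0 ≤ M2 := le_trans hu0 huM2
    have : u * v ≤ M1 * M2 := by nlinarith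
    exact le_trans this (le_max_left _ _)
  · rcases le_or_gt 0 v with hv0 | hv0
    · -- u < 0 ≤ v
      rcases le_or_gt 0 M2 with hM20 | hM20
      · have : u * v ≤ M1 * M2 := by nlinarith [le_trans hv0 hvM1]
        exact le_trans this (le_max_left _ _)
      · -- M2 < 0: every element of s except the last is ≤ M2 < 0 ≤ v, so v = M1
        have hvM1' : v = M1 := by
          have hv' : v ∈ s.reverse := by simp; exact huv.subset (by simp)
          rw [h2] at hv' hrevpw
          rcases List.mem_cons.mp hv' with h | h
          · exact h
          · have : v ≤ M2 := by
              rcases List.mem_cons.mp h with h | h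
              · omega
              · exact ((List.pairwise_cons.mp hrevpw).2 |> List.pairwise_cons.mp).1 v h
            omega
        have : u * v ≤ M1 * M2 := by nlinarith [hvM1' ▸ hv0]
        exact le_trans this (le_max_left _ _)
    · -- v < 0 : u*v ≤ u*m2 ≤ m1*m2
      have hm20 : m2 < 0 := lt_of_le_of_lt hm2v hv0
      have : u * v ≤ m1 * m2 := by nlinarith
      exact le_trans this (le_max_right _ _)

-- ===== VERDICT (by name: the statement is the Claim_ definition above) =====
theorem two_le_length_destruct {l : List Int} (h : 2 ≤ l.length) :
    ∃ a b t, l = a :: b :: t := by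
  rcases l with _ | ⟨a, _ | ⟨b, t⟩⟩
  · simp at h
  · simp at h
  · exact ⟨a, b, t, rfl⟩

theorem pvCombos_exists_iff (arr : List Int) (t : Int) :
    (∃ p ∈ pvCombos arr, p.1 * p.2 > t) ↔ PvEx arr t := by
  constructor
  · rintro ⟨⟨u, v⟩, hm, hgt⟩
    exact ⟨u, v, (mem_pvCombos u v arr).mp hm, hgt⟩
  · rintro ⟨u, v, hs, hgt⟩
    exact ⟨(u, v), (mem_pvCombos u v arr).mpr hs, hgt⟩

theorem SumMultiplier_spec : Claim_equal_SumMultiplier := by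
  intro arr _
  unfold Spec_SumMultiplier SumMultiplier SumMultiplier_alt
  rw [pvLoopA_eq]
  by_cases hlen : arr.length < 2
  · rw [if_pos hlen, if_neg]
    rintro ⟨⟨u, v⟩, hm, -⟩
    have h2 := ((mem_pvCombos u v arr).mp hm).length_le
    simp at h2
    omega
  · rw [if_neg hlen]
    set s := PySem.List.sorted arr (fun x => x) false with hsdef
    have hperm : s.Perm arr := PySem.List.sorted_perm arr (fun x => x) false
    have hpw : s.Pairwise (· ≤ ·) := by
      have := PySem.List.sorted_pairwise arr (fun x => x)
      simpa using this
    have hlens : s.length = arr.length := hperm.length_eq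
    obtain ⟨m1, m2, rest, h1⟩ := two_le_length_destruct (l := s) (by omega)
    obtain ⟨M1, M2, rr, h2⟩ := two_le_length_destruct (l := s.reverse) (by simp; omega)
    have hs' : s = rr.reverse ++ [M2, M1] := by
      have := congrArg List.reverse h2
      simpa using this
    have hlrr : s.length = rr.length + 2 := by
      rw [hs']; simp
    -- the four indexings
    have g1 : (PySem.List.pyGet? s (-1)).getD 0 = M1 := by
      rw [PySem.List.pyGet?_neg_one, List.getLast?_eq_head?_reverse, h2]
      rfl
    have g2 : (PySem.List.pyGet? s (-2)).getD 0 = M2 := by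
      have hcast : (-2 : Int) = -((2 : Nat) : Int) := by norm_num
      rw [hcast, PySem.List.pyGet?_neg_natCast s 2 (by norm_num) (by omega)]
      have hidx : s.length - 2 = rr.reverse.length := by simp; omega
      rw [hidx, hs', List.getElem?_append_right (le_refl _)]
      simp
    have g3 : (PySem.List.pyGet? s 0).getD 0 = m1 := by
      rw [h1, PySem.List.pyGet?_zero_cons]; rfl
    have g4 : (PySem.List.pyGet? s 1).getD 0 = m2 := by
      have : (1 : Int) = ((0 : Nat) : Int) + 1 := by norm_num
      rw [h1, this, PySem.List.pyGet?_cons_succ]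
      simp
    simp only [g1, g2, g3, g4]
    -- the two conditions are equivalent
    have hiff : (∃ p ∈ pvCombos arr, p.1 * p.2 > arr.sum * 2) ↔
        max (M1 * M2) (m1 * m2) > 2 * arr.sum := by
      rw [pvCombos_exists_iff, pvEx_perm hperm.symm]
      constructor
      · rintro ⟨u, v, hsub, hgt⟩
        have := pair_le_best hpw h1 h2 hsub
        have h2s : arr.sum * 2 = 2 * arr.sum := by ring
        omega
      · intro hgt
        rcases lt_max_iff.mp hgt with h | h
        · refine ⟨M2, M1, ?_, by linarith [mul_comm M1 M2]⟩
          rw [hs']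
          exact List.sublist_append_right _ _
        · refine ⟨m1, m2, ?_, by linarith⟩
          rw [h1]
          exact List.Sublist.cons₂ _ (List.Sublist.cons₂ _ (List.nil_sublist rest))
    rw [if_congr hiff rfl rfl]
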